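-- pv_equiv track=rewrite | github.com/meak-c/python-practice | 1-6.py | next_valid_number
-- ===== SOURCE A (Python) =====
-- def next_valid_number(n):
--     answer_num = n + 1
--     while True:
--         test = False
--         check_num = str(answer_num)
--         for i in range(len(check_num)):
--             for j in range(i + 1, len(check_num)):
--                 if check_num[i] == check_num[j]:
--                     test = True
--
--         if answer_num % 3 != 0 and answer_num % 5 != 0 and not test:
--             return answer_num
--
--         answer_num += 1
-- ===== SOURCE B (Python) =====
-- _FIRST = (1, 0, 0, 1, 0, 2, 1, 0, 0, 2, 1, 0, 1, 0, 0)
-- _GAP = (1, 1, 2, 1, 3, 2, 1, 1, 3, 2, 1, 2, 1, 1, 2)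
--
--
-- def next_valid_number(n):
--     # Wheel mod 15: jump directly to the next number divisible by neither 3 nor 5,
--     # then hop only between such numbers until one has pairwise-distinct digits.
--     k = n + 1
--     k += _FIRST[k % 15]
--     while not _digits_distinct(k):
--         k += _GAP[k % 15]
--     return k
--
--
-- def _digits_distinct(k):
--     # arithmetic digit extraction with a seen-set; no string is built
--     m = abs(k)
--     seen = set()
--     while True:
--         m, d = divmod(m, 10)
--         if d in seen:
--             return False
--         seen.add(d)
--         if m == 0:
--             return True
-- ===== Notes on version B (the rewrite author's own statement) =====
-- stated objective: alternative
-- what changed: A's candidate-by-candidate scan with per-candidate %3/%5 tests and an O(d^2) nested pairwise scan over str(k) is replaced by a mod-15 wheel (precomputed jump tables visit only numbers divisible by neither 3 nor 5, no divisibility test in the loop) and an arithmetic divmod digit extraction with a seen-set that never builds a string.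
import Mathlib
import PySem

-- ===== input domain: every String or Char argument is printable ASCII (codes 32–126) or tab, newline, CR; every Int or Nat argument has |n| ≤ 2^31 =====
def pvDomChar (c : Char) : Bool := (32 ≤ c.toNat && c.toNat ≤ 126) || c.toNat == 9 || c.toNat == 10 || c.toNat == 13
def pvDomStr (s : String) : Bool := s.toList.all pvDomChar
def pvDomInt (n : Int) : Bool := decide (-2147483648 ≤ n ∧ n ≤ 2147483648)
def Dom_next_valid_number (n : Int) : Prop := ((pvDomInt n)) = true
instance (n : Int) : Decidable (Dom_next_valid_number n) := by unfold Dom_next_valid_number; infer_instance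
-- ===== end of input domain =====

-- B replaces A's linear scan (per-candidate %3/%5 tests plus an O(d^2) nested pairwise scan
-- over str(k)) by a mod-15 wheel with precomputed jump tables and an arithmetic divmod digit
-- extraction over a seen-set (objective: alternative); return values agree on every input.
--
-- Both 'while' loops are ported with a Nat fuel that only makes the recursion total in Lean:
-- the search stops at 987654302 at the latest (the largest integer with distinct digit
-- characters divisible by neither 3 nor 5 — larger candidates have ten or more digits, hence a
-- repeat or digit sum 45), so fuel exhaustion is only reached on inputs where the Python loops
-- never return.

-- ===== PORT A =====
-- A's inner nested loops: for i in range(len(cs)): for j in range(i+1, len(cs)): if cs[i]==cs[j]: test = True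
def pvTestA (cs : List Char) : Bool :=
  (PySem.List.pyRange 0 (cs.length : Int) 1).foldl (fun test i =>
    (PySem.List.pyRange (i + 1) (cs.length : Int) 1).foldl (fun test j =>
      if PySem.List.pyGetD cs i ' ' == PySem.List.pyGetD cs j ' ' then true else test) test) false

-- A's 'while True' loop starting at answer_num (fuel/bound as explained above)
def pvLoopA : Nat → Int → Int
  | 0, _ => 0
  | fuel + 1, k =>
    if 987654302 < k then 0
    else if PySem.Int.mod k 3 != 0 && PySem.Int.mod k 5 != 0
        && !(pvTestA (PySem.Int.toChars k)) then k
    else pvLoopA fuel (k + 1)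

def next_valid_number (n : Int) : Int := pvLoopA (987654303 - (n + 1)).toNat (n + 1)

-- ===== PORT B =====
-- B's module-level jump tables _FIRST and _GAP (Python tuples; indexed by k % 15, which is
-- always in range 0..14, so PySem.List.pyGetD with an unused default is exact)
def pvFirst : List Int := [1, 0, 0, 1, 0, 2, 1, 0, 0, 2, 1, 0, 1, 0, 0]
def pvGap : List Int := [1, 1, 2, 1, 3, 2, 1, 1, 3, 2, 1, 2, 1, 1, 2]

-- B's inner 'while True' divmod loop; 'seen' is the Python set. The fuel only makes the
-- recursion total: it is called with fuel |k|+1, more than the number of digits.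
def pvDigitsGo : Nat → Int → PySem.Set Int → Bool
  | 0, _, _ => false
  | fuel + 1, m, seen =>
    let d := PySem.Int.mod m 10
    let m' := PySem.Int.floordiv m 10
    if seen.contains d then false
    else if m' = 0 then true
    else pvDigitsGo fuel m' (seen.add d)

-- B's _digits_distinct(k); Python abs(k) is |k|
def pvDigitsDistinct (k : Int) : Bool := pvDigitsGo (|k|.toNat + 1) |k| []

-- B's wheel loop 'while not _digits_distinct(k): k += _GAP[k % 15]' (fuel/bound as above)
def pvLoopB : Nat → Int → Int
  | 0, _ => 0
  | fuel + 1, k =>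
    if 987654302 < k then 0
    else if pvDigitsDistinct k then k
    else pvLoopB fuel (k + PySem.List.pyGetD pvGap (PySem.Int.mod k 15) 0)

def next_valid_number_alt (n : Int) : Int :=
  pvLoopB (987654303 - (n + 1 + PySem.List.pyGetD pvFirst (PySem.Int.mod (n + 1) 15) 0)).toNat
    (n + 1 + PySem.List.pyGetD pvFirst (PySem.Int.mod (n + 1) 15) 0)

-- ===== PRECONDITION & SPEC =====
def Spec_next_valid_number (n : Int) (out : Int) : Prop := out = next_valid_number_alt n
instance (n : Int) (out : Int) : Decidable (Spec_next_valid_number n out) := by unfold Spec_next_valid_number; infer_instance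

-- ===== CLAIM (what is proved, stated in full; the proofs are below) =====
def Claim_equal_next_valid_number : Prop := ∀ (n : Int), Dom_next_valid_number n → Spec_next_valid_number n (next_valid_number n)

-- ===== LEMMAS AND PROOFS =====

-- fuel-free twins of the two loops (well-founded recursion, used only inside the proofs)
def pvLoopA' (k : Int) : Int :=
  if 987654302 < k then 0
  else if PySem.Int.mod k 3 != 0 && PySem.Int.mod k 5 != 0
      && !(pvTestA (PySem.Int.toChars k)) then k
  else pvLoopA' (k + 1)
termination_by (987654303 - k).toNat
decreasing_by omega

-- every _GAP entry is positive
theorem pvGap_pos (r : Int) (h0 : 0 ≤ r) (h15 : r < 15) : 1 ≤ PySem.List.pyGetD pvGap r 0 := by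
  interval_cases r <;> norm_num [pvGap, PySem.List.pyGetD, Int.toNat]

def pvLoopB' (k : Int) : Int :=
  if 987654302 < k then 0
  else if pvDigitsDistinct k then k
  else pvLoopB' (k + PySem.List.pyGetD pvGap (PySem.Int.mod k 15) 0)
termination_by (987654303 - k).toNat
decreasing_by
  have h1 := PySem.Int.mod_nonneg k (b := 15) (by norm_num)
  have h2 := PySem.Int.mod_lt k (b := 15) (by norm_num)
  have h3 := pvGap_pos _ h1 h2
  omega

-- with at least the measure's worth of fuel, each fuel loop computes its fuel-free twin
theorem pvLoopA_fuel : ∀ (f : Nat) (k : Int), (987654303 - k).toNat ≤ f →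
    pvLoopA f k = pvLoopA' k := by
  intro f
  induction f with
  | zero =>
    intro k hk
    rw [pvLoopA, pvLoopA', if_pos (by omega)]
  | succ f ih =>
    intro k hk
    rw [pvLoopA, pvLoopA']
    by_cases hb : 987654302 < k
    · rw [if_pos hb, if_pos hb]
    · rw [if_neg hb, if_neg hb]
      by_cases hc : (PySem.Int.mod k 3 != 0 && PySem.Int.mod k 5 != 0
          && !(pvTestA (PySem.Int.toChars k))) = true
      · rw [if_pos hc, if_pos hc]
      · rw [if_neg hc, if_neg hc]
        exact ih (k + 1) (by omega)

theorem pvLoopB_fuel : ∀ (f : Nat) (k : Int), (987654303 - k).toNat ≤ f →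
    pvLoopB f k = pvLoopB' k := by
  intro f
  induction f with
  | zero =>
    intro k hk
    rw [pvLoopB, pvLoopB', if_pos (by omega)]
  | succ f ih =>
    intro k hk
    rw [pvLoopB, pvLoopB']
    by_cases hb : 987654302 < k
    · rw [if_pos hb, if_pos hb]
    · rw [if_neg hb, if_neg hb]
      by_cases hc : pvDigitsDistinct k = true
      · rw [if_pos hc, if_pos hc]
      · rw [if_neg hc, if_neg hc]
        have h1 := PySem.Int.mod_nonneg k (b := 15) (by norm_num)
        have h2 := PySem.Int.mod_lt k (b := 15) (by norm_num)
        have h3 := pvGap_pos _ h1 h2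
        exact ih _ (by omega)

-- ---- A's pairwise scan detects exactly a repeated character ----

-- a fold that can only ever set its Boolean accumulator to true computes 'init || any'
theorem pv_foldl_if_true {α : Type} (p : α → Bool) (l : List α) (b : Bool) :
    l.foldl (fun t x => if p x then true else t) b = (b || l.any p) := by
  induction l generalizing b with
  | nil => simp
  | cons x xs ih =>
    simp only [List.foldl_cons, List.any_cons, ih]
    by_cases h : p x = true <;> simp [h]

theorem pv_foldl_or {α : Type} (q : α → Bool) (l : List α) (b : Bool) :
    l.foldl (fun t x => t || q x) b = (b || l.any q) := by
  induction l generalizing b with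
  | nil => simp
  | cons x xs ih => simp [List.foldl_cons, ih, Bool.or_assoc]

theorem pvTestA_eq_any (cs : List Char) :
    pvTestA cs = (PySem.List.pyRange 0 (cs.length : Int) 1).any (fun i =>
      (PySem.List.pyRange (i + 1) (cs.length : Int) 1).any (fun j =>
        PySem.List.pyGetD cs i ' ' == PySem.List.pyGetD cs j ' ')) := by
  unfold pvTestA
  rw [show (fun (test : Bool) (i : Int) =>
      (PySem.List.pyRange (i + 1) (cs.length : Int) 1).foldl (fun test j =>
        if PySem.List.pyGetD cs i ' ' == PySem.List.pyGetD cs j ' ' then true else test) test)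
    = (fun (test : Bool) (i : Int) =>
      test || (PySem.List.pyRange (i + 1) (cs.length : Int) 1).any (fun j =>
        PySem.List.pyGetD cs i ' ' == PySem.List.pyGetD cs j ' ')) from
    funext fun t => funext fun i => pv_foldl_if_true _ _ t]
  rw [pv_foldl_or]
  simp

-- A's pairwise scan fires exactly when the character list has a repeat
theorem pvTestA_iff_not_nodup (cs : List Char) : pvTestA cs = true ↔ ¬ cs.Nodup := by
  rw [pvTestA_eq_any, List.any_eq_true]
  constructor
  · rintro ⟨i, hi, hany⟩
    rw [List.any_eq_true] at hany
    obtain ⟨j, hj, hbeq⟩ := hany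
    rw [PySem.List.mem_pyRange_one] at hi hj
    intro hnd
    rw [List.nodup_iff_getElem?_ne_getElem?] at hnd
    have hilen : i.toNat < cs.length := by omega
    have hjlen : j.toNat < cs.length := by omega
    have hgi : PySem.List.pyGetD cs i ' ' = cs[i.toNat] :=
      PySem.List.pyGetD_eq_getElem cs ' ' hi.1 hi.2
    have hgj : PySem.List.pyGetD cs j ' ' = cs[j.toNat] :=
      PySem.List.pyGetD_eq_getElem cs ' ' (by omega) hj.2
    have heq : cs[i.toNat] = cs[j.toNat] := by
      rw [← hgi, ← hgj]; exact eq_of_beq hbeq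
    exact hnd i.toNat j.toNat (by omega) hjlen
      (by rw [List.getElem?_eq_getElem hilen, List.getElem?_eq_getElem hjlen, heq])
  · intro hnd
    rw [List.nodup_iff_getElem?_ne_getElem?] at hnd
    push Not at hnd
    obtain ⟨i, j, hij, hjlen, heq⟩ := hnd
    have hilen : i < cs.length := by omega
    have hiZ : (i : Int) < (cs.length : Int) := by exact_mod_cast hilen
    have hjZ : (j : Int) < (cs.length : Int) := by exact_mod_cast hjlen
    refine ⟨(i : Int), ?_, ?_⟩
    · rw [PySem.List.mem_pyRange_one]
      exact ⟨Int.natCast_nonneg i, hiZ⟩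
    · rw [List.any_eq_true]
      refine ⟨(j : Int), ?_, ?_⟩
      · rw [PySem.List.mem_pyRange_one]
        constructor
        · have : (i : Int) < (j : Int) := by exact_mod_cast hij
          omega
        · exact hjZ
      · have hgi : PySem.List.pyGetD cs (i : Int) ' ' = cs[((i : Int)).toNat] :=
          PySem.List.pyGetD_eq_getElem cs ' ' (Int.natCast_nonneg i) hiZ
        have hgj : PySem.List.pyGetD cs (j : Int) ' ' = cs[((j : Int)).toNat] :=
          PySem.List.pyGetD_eq_getElem cs ' ' (Int.natCast_nonneg j) hjZ
        rw [List.getElem?_eq_getElem hilen, List.getElem?_eq_getElem hjlen] at heq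
        simp only [Option.some.injEq] at heq
        simp [hgi, hgj]
        simpa using heq

-- ---- B's divmod loop detects exactly a repeated digit ----

-- the least-significant-first digit list the divmod loop walks over
def pvDigs (t : Nat) : List Nat :=
  if h : t / 10 = 0 then [t % 10] else t % 10 :: pvDigs (t / 10)
termination_by t
decreasing_by omega

theorem pvDigs_lt (t : Nat) : ∀ d ∈ pvDigs t, d < 10 := by
  induction t using pvDigs.induct with
  | case1 t h => rw [pvDigs, dif_pos h]; intro d hd; simp at hd; omega
  | case2 t h ih =>
    rw [pvDigs, dif_neg h]
    intro d hd
    rcases List.mem_cons.1 hd with h1 | h1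
    · omega
    · exact ih d h1

-- the divmod loop returns true iff the remaining digits are pairwise distinct and unseen
theorem pvDigitsGo_char : ∀ (f : Nat) (t : Nat), t < f → ∀ seen : PySem.Set Int,
    (pvDigitsGo f (t : Nat) seen = true ↔
      (pvDigs t).Nodup ∧ ∀ d ∈ pvDigs t, ((d : Int) ∈ seen → False)) := by
  intro f
  induction f with
  | zero => intro t ht; omega
  | succ f ih =>
    intro t ht seen
    rw [pvDigitsGo, pvDigs]
    have hm : PySem.Int.mod (t : Int) 10 = ((t % 10 : Nat) : Int) := PySem.Int.mod_natCast t 10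
    have hd : PySem.Int.floordiv (t : Int) 10 = ((t / 10 : Nat) : Int) := PySem.Int.floordiv_natCast t 10
    simp only [hm, hd]
    by_cases h : t / 10 = 0
    · rw [dif_pos h]
      simp only [h, Nat.cast_zero]
      by_cases hc : seen.contains ((t % 10 : Nat) : Int)
      · rw [if_pos hc]
        have hcm : ((t % 10 : Nat) : Int) ∈ seen := by simpa using hc
        constructor
        · intro hfalse; exact absurd hfalse (by simp)
        · rintro ⟨-, hall⟩; exact absurd (hall (t % 10) (List.mem_singleton.2 rfl) hcm) id
      · rw [if_neg hc, if_pos trivial]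
        have hcm : ((t % 10 : Nat) : Int) ∉ seen := by simpa using hc
        constructor
        · intro _
          refine ⟨by simp, ?_⟩
          intro d hd' hmem
          simp only [List.mem_singleton] at hd'
          subst hd'
          exact hcm hmem
        · intro _; rfl
    · rw [dif_neg h]
      rw [if_neg (show ¬(((t / 10 : Nat) : Int) = 0) by exact_mod_cast h)]
      by_cases hc : seen.contains ((t % 10 : Nat) : Int)
      · rw [if_pos hc]
        have hcm : ((t % 10 : Nat) : Int) ∈ seen := by simpa using hc
        constructor
        · intro hfalse; exact absurd hfalse (by simp)
        · rintro ⟨-, hall⟩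
          exact absurd (hall (t % 10) (List.mem_cons_self ..) hcm) id
      · rw [if_neg hc]
        have hcm : ((t % 10 : Nat) : Int) ∉ seen := by simpa using hc
        rw [ih (t / 10) (by omega) (seen.add ((t % 10 : Nat) : Int))]
        simp only [List.nodup_cons, List.mem_cons]
        constructor
        · rintro ⟨hnd, hall⟩
          refine ⟨⟨?_, hnd⟩, ?_⟩
          · intro hmem
            exact hall (t % 10) hmem ((PySem.Set.mem_add seen _ _).2 (Or.inr rfl))
          · intro d hd' hmem
            rcases hd' with h1 | h1
            · subst h1; exact hcm hmem
            · exact hall d h1 ((PySem.Set.mem_add seen _ _).2 (Or.inl hmem))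
        · rintro ⟨⟨hnm, hnd⟩, hall⟩
          refine ⟨hnd, ?_⟩
          intro d hd' hmem
          rcases (PySem.Set.mem_add seen ((t % 10 : Nat) : Int) (d : Int)).1 hmem with h1 | h1
          · exact hall d (Or.inr hd') h1
          · have : d = t % 10 := by exact_mod_cast h1
            subst this
            exact hnm hd'

-- ---- Nat.toDigits is the reversed digit list mapped through digitChar ----

theorem pv_toDigitsCore_eq (fuel : Nat) : ∀ t ds, t < fuel →
    Nat.toDigitsCore 10 fuel t ds = ((pvDigs t).map Nat.digitChar).reverse ++ ds := by
  induction fuel with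
  | zero => intro t ds h; omega
  | succ f ih =>
    intro t ds h
    rw [Nat.toDigitsCore, pvDigs]
    by_cases h0 : t / 10 = 0
    · rw [dif_pos h0]
      simp [h0]
    · rw [dif_neg h0]
      simp only [h0, if_false]
      rw [ih (t / 10) _ (by omega)]
      simp

theorem pv_toDigits_eq (t : Nat) :
    Nat.toDigits 10 t = ((pvDigs t).map Nat.digitChar).reverse ++ [] :=
  pv_toDigitsCore_eq (t + 1) t [] (by omega)

theorem pv_digitChar_inj : ∀ a < 10, ∀ b < 10, Nat.digitChar a = Nat.digitChar b → a = b := by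
  decide

theorem pv_digitChar_ne_dash : ∀ a < 10, Nat.digitChar a ≠ '-' := by decide

theorem pv_nodup_toDigits (t : Nat) : (Nat.toDigits 10 t).Nodup ↔ (pvDigs t).Nodup := by
  rw [pv_toDigits_eq]
  simp only [List.append_nil, List.nodup_reverse]
  constructor
  · exact List.Nodup.of_map _
  · exact fun hnd => List.Nodup.map_on
      (fun a ha b hb => pv_digitChar_inj a (pvDigs_lt t a ha) b (pvDigs_lt t b hb)) hnd

theorem pv_dash_notin_toDigits (t : Nat) : '-' ∉ Nat.toDigits 10 t := by
  rw [pv_toDigits_eq]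
  simp only [List.append_nil, List.mem_reverse, List.mem_map]
  rintro ⟨d, hd, hh⟩
  exact pv_digitChar_ne_dash d (pvDigs_lt t d hd) hh

-- B's digit test agrees with distinctness of A's str(k) characters
theorem pvDigitsDistinct_iff_nodup (k : Int) :
    pvDigitsDistinct k = true ↔ (PySem.Int.toChars k).Nodup := by
  unfold pvDigitsDistinct PySem.Int.toChars
  have habs : |k| = ((k.natAbs : Nat) : Int) := by
    rcases abs_cases k with ⟨h1, h2⟩ | ⟨h1, h2⟩ <;> omega
  rw [habs, Int.toNat_natCast, pvDigitsGo_char (k.natAbs + 1) k.natAbs (by omega) []]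
  by_cases hneg : k < 0
  · rw [if_pos hneg]
    rw [List.nodup_cons, pv_nodup_toDigits]
    constructor
    · rintro ⟨hnd, -⟩; exact ⟨pv_dash_notin_toDigits _, hnd⟩
    · rintro ⟨-, hnd⟩; exact ⟨hnd, by simp⟩
  · rw [if_neg hneg]
    have htn2 : k.toNat = k.natAbs := by omega
    rw [htn2, pv_nodup_toDigits]
    constructor
    · rintro ⟨hnd, -⟩; exact hnd
    · intro hnd; exact ⟨hnd, by simp⟩

-- A's acceptance test on the digits is exactly B's digit test
theorem pv_test_eq_digits (k : Int) :
    (!(pvTestA (PySem.Int.toChars k))) = pvDigitsDistinct k := by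
  by_cases h : (PySem.Int.toChars k).Nodup
  · have h1 : pvTestA (PySem.Int.toChars k) = false := by
      rw [← Bool.not_eq_true, pvTestA_iff_not_nodup]; simpa using h
    have h2 : pvDigitsDistinct k = true := (pvDigitsDistinct_iff_nodup k).2 h
    rw [h1, h2]; rfl
  · have h1 : pvTestA (PySem.Int.toChars k) = true := (pvTestA_iff_not_nodup _).2 h
    have h2 : pvDigitsDistinct k = false := by
      rw [← Bool.not_eq_true, pvDigitsDistinct_iff_nodup]; exact h
    rw [h1, h2]; rfl

-- ---- the mod-15 wheel ----

-- the residues mod 15 of numbers divisible by neither 3 nor 5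
def pvAllowed (k : Int) : Prop :=
  k % 15 = 1 ∨ k % 15 = 2 ∨ k % 15 = 4 ∨ k % 15 = 7 ∨ k % 15 = 8 ∨
  k % 15 = 11 ∨ k % 15 = 13 ∨ k % 15 = 14

theorem pvAllowed_iff (k : Int) : pvAllowed k ↔ (k % 3 ≠ 0 ∧ k % 5 ≠ 0) := by
  unfold pvAllowed; omega

theorem pv_mod15 (k : Int) : PySem.Int.mod k 15 = k % 15 :=
  PySem.Int.mod_eq_emod_of_pos (by norm_num)

-- one step of A's loop across a candidate that fails the divisibility test
theorem pv_stepA (m : Int) (h : m % 3 = 0 ∨ m % 5 = 0) : pvLoopA' m = pvLoopA' (m + 1) := by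
  by_cases hb : 987654302 < m
  · rw [pvLoopA', if_pos hb, pvLoopA', if_pos (by omega)]
  · rw [pvLoopA', if_neg hb]
    have h3 : PySem.Int.mod m 3 = m % 3 := PySem.Int.mod_eq_emod_of_pos (by norm_num)
    have h5 : PySem.Int.mod m 5 = m % 5 := PySem.Int.mod_eq_emod_of_pos (by norm_num)
    rcases h with h | h
    · simp [h3, h, bne]
      try (intro hdv; exact absurd (Int.dvd_of_emod_eq_zero h) hdv)
      try (intro _ hdv; exact absurd (Int.dvd_of_emod_eq_zero h) hdv)
    · simp [h5, h, bne]
      try (intro _ hdv; exact absurd (Int.dvd_of_emod_eq_zero h) hdv)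
      try (intro hdv; exact absurd (Int.dvd_of_emod_eq_zero h) hdv)

-- wheel gap facts: the gap is 1..3, lands on an allowed residue, and skips only 3/5-divisible numbers
theorem pv_wheel_step (k : Int) (h : pvAllowed k) :
    1 ≤ PySem.List.pyGetD pvGap (PySem.Int.mod k 15) 0 ∧
    PySem.List.pyGetD pvGap (PySem.Int.mod k 15) 0 ≤ 3 ∧
    pvAllowed (k + PySem.List.pyGetD pvGap (PySem.Int.mod k 15) 0) ∧
    (∀ t : Int, 0 < t → t < PySem.List.pyGetD pvGap (PySem.Int.mod k 15) 0 →
      ((k + t) % 3 = 0 ∨ (k + t) % 5 = 0)) := by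
  rw [pv_mod15]
  rcases h with h | h | h | h | h | h | h | h <;>
    (rw [h]
     norm_num [pvAllowed, pvGap, PySem.List.pyGetD, Int.toNat]
     try exact ⟨by omega, by omega⟩
     try (refine ⟨by omega, ?_⟩; intro t ht1 ht2; omega))

-- alignment facts for _FIRST: offset 0..2, lands on an allowed residue, skips only 3/5-divisible numbers
theorem pv_align (k : Int) :
    0 ≤ PySem.List.pyGetD pvFirst (PySem.Int.mod k 15) 0 ∧
    PySem.List.pyGetD pvFirst (PySem.Int.mod k 15) 0 ≤ 2 ∧
    pvAllowed (k + PySem.List.pyGetD pvFirst (PySem.Int.mod k 15) 0) ∧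
    (∀ t : Int, 0 ≤ t → t < PySem.List.pyGetD pvFirst (PySem.Int.mod k 15) 0 →
      ((k + t) % 3 = 0 ∨ (k + t) % 5 = 0)) := by
  rw [pv_mod15]
  have hr : k % 15 = 0 ∨ k % 15 = 1 ∨ k % 15 = 2 ∨ k % 15 = 3 ∨ k % 15 = 4 ∨ k % 15 = 5 ∨
      k % 15 = 6 ∨ k % 15 = 7 ∨ k % 15 = 8 ∨ k % 15 = 9 ∨ k % 15 = 10 ∨ k % 15 = 11 ∨
      k % 15 = 12 ∨ k % 15 = 13 ∨ k % 15 = 14 := by omega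
  rcases hr with h | h | h | h | h | h | h | h | h | h | h | h | h | h | h <;>
    (rw [h]
     norm_num [pvAllowed, pvFirst, PySem.List.pyGetD, Int.toNat]
     try exact ⟨by omega, by omega⟩
     try (refine ⟨by omega, by omega, ?_⟩; intro t ht1 ht2; omega)
     try (refine ⟨by omega, ?_⟩; intro t ht1 ht2; omega)
     try omega)

-- at a wheel-aligned k the two fuel-free loops agree
theorem pv_loopBA (k : Int) : pvAllowed k → pvLoopB' k = pvLoopA' k := by
  induction k using pvLoopB'.induct with
  | case1 k hb =>
    intro _
    rw [pvLoopB', if_pos hb, pvLoopA', if_pos hb]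
  | case2 k hb hd =>
    intro h
    obtain ⟨h3, h5⟩ := (pvAllowed_iff k).1 h
    have hm3 : PySem.Int.mod k 3 = k % 3 := PySem.Int.mod_eq_emod_of_pos (by norm_num)
    have hm5 : PySem.Int.mod k 5 = k % 5 := PySem.Int.mod_eq_emod_of_pos (by norm_num)
    have hcond : (PySem.Int.mod k 3 != 0 && PySem.Int.mod k 5 != 0
        && !(pvTestA (PySem.Int.toChars k))) = true := by
      rw [pv_test_eq_digits, hd, hm3, hm5]
      simp [bne, h3, h5]
    rw [pvLoopB', if_neg hb, if_pos hd, pvLoopA', if_neg hb, if_pos hcond]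
  | case3 k hb hd ih =>
    intro h
    have hdd : pvDigitsDistinct k = false := by simpa using hd
    obtain ⟨hg1, hg3, hgA, hgs⟩ := pv_wheel_step k h
    set g := PySem.List.pyGetD pvGap (PySem.Int.mod k 15) 0 with hgdef
    have hB : pvLoopB' k = pvLoopB' (k + g) := by
      rw [pvLoopB', if_neg hb, if_neg hd]
    have hcond : (PySem.Int.mod k 3 != 0 && PySem.Int.mod k 5 != 0
        && !(pvTestA (PySem.Int.toChars k))) = false := by
      rw [pv_test_eq_digits, hdd]
      simp
    have hA0 : pvLoopA' k = pvLoopA' (k + 1) := by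
      rw [pvLoopA', if_neg hb, if_neg (by rw [hcond]; exact Bool.false_ne_true)]
    have hAB := ih hgA
    rw [hB, hAB]
    have hg123 : g = 1 ∨ g = 2 ∨ g = 3 := by omega
    rcases hg123 with hg | hg | hg
    · rw [hg]; exact hA0.symm
    · have hs1 : pvLoopA' (k + 1) = pvLoopA' (k + 2) := by
        have e : k + 1 + 1 = k + 2 := by ring
        rw [pv_stepA (k + 1) (hgs 1 (by omega) (by omega)), e]
      rw [hg]; exact (hA0.trans hs1).symm
    · have hs1 : pvLoopA' (k + 1) = pvLoopA' (k + 2) := by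
        have e : k + 1 + 1 = k + 2 := by ring
        rw [pv_stepA (k + 1) (hgs 1 (by omega) (by omega)), e]
      have hs2 : pvLoopA' (k + 2) = pvLoopA' (k + 3) := by
        have e : k + 2 + 1 = k + 3 := by ring
        rw [pv_stepA (k + 2) (hgs 2 (by omega) (by omega)), e]
      rw [hg]; exact ((hA0.trans hs1).trans hs2).symm

-- ===== VERDICT (by name: the statement is the Claim_ definition above) =====
theorem next_valid_number_spec : Claim_equal_next_valid_number := by
  intro n _
  unfold Spec_next_valid_number next_valid_number next_valid_number_alt
  obtain ⟨hf0, hf2, hfA, hfs⟩ := pv_align (n + 1)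
  set f := PySem.List.pyGetD pvFirst (PySem.Int.mod (n + 1) 15) 0 with hfdef
  rw [pvLoopA_fuel _ _ (by omega), pvLoopB_fuel _ _ (by omega)]
  have hBA : pvLoopB' (n + 1 + f) = pvLoopA' (n + 1 + f) := pv_loopBA _ hfA
  rw [hBA]
  have hf012 : f = 0 ∨ f = 1 ∨ f = 2 := by omega
  rcases hf012 with hf | hf | hf
  · rw [hf, add_zero]
  · have hs0 : pvLoopA' (n + 1) = pvLoopA' (n + 1 + 1) := by
      have := hfs 0 (by omega) (by omega)
      rw [add_zero] at this
      exact pv_stepA (n + 1) this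
    rw [hf, hs0]
  · have hs0 : pvLoopA' (n + 1) = pvLoopA' (n + 1 + 1) := by
      have := hfs 0 (by omega) (by omega)
      rw [add_zero] at this
      exact pv_stepA (n + 1) this
    have hs1 : pvLoopA' (n + 1 + 1) = pvLoopA' (n + 1 + 2) := by
      have e : n + 1 + 1 + 1 = n + 1 + 2 := by ring
      rw [pv_stepA (n + 1 + 1) (hfs 1 (by omega) (by omega)), e]
    rw [hf, hs0, hs1]
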